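-- pv_equiv track=rewrite | github.com/Kingdageek/Learn_Python | P.1.35.goodrich.py | count
-- ===== SOURCE A (Python) =====
-- def count(some_list):
--     """TAKES A 2D LIST AND RETURNS A TUPLE OF TWO 2D LISTS (THE 2D LIST OF COUNTS OF SAMPLES
--     AND THE 2D LIST OF ANALYSIS OF THOSE COUNTS) . IT COUNTS THE NUMBER OF TIMES A BIRTHDAY OCCURS
--     IN THE RESULT OF ONE SAMPLE"""
--     count_same_birthday = []
--     count_birthday_analysis = []
--     for element in some_list:
--         li = []
--         count_val = []
--         count_analysis = []
--         for value in element: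
--             count = 0
--             for i in range(len(element)):
--                 if value == element[i]:
--                     count+=1
--             if value not in li:
--                 count_val.append(count)
--                 if count == 1:
--                     count_analysis.append(value + " appears once.")
--                 else:
--                     count_analysis.append(value + " appears " + str(count) + " times.")
--                 li.append(value)
--         count_same_birthday.append(count_val)
--         count_birthday_analysis.append(count_analysis)
--     return count_same_birthday, count_birthday_analysis
-- ===== SOURCE B (Python) =====
-- def count(some_list):
--     """TAKES A 2D LIST AND RETURNS A TUPLE OF TWO 2D LISTS (THE 2D LIST OF COUNTS OF SAMPLES
--     AND THE 2D LIST OF ANALYSIS OF THOSE COUNTS)."""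
--     count_same_birthday = []
--     count_birthday_analysis = []
--     for element in some_list:
--         table = {}
--         for value in element:
--             table[value] = table.get(value, 0) + 1
--         count_val = []
--         count_analysis = []
--         for value, c in table.items():
--             count_val.append(c)
--             if c == 1:
--                 count_analysis.append(value + " appears once.")
--             else:
--                 count_analysis.append(value + " appears " + str(c) + " times.")
--         count_same_birthday.append(count_val)
--         count_birthday_analysis.append(count_analysis)
--     return count_same_birthday, count_birthday_analysis
-- ===== Notes on version B (the rewrite author's own statement) =====
-- stated objective: faster
-- what changed: Replaces A's per-value rescans (an inner count loop over the whole sublist plus a seen-list membership test for every value) with one pass per sublist that builds a value->count dict, then a single traversal of the dict's items (already in first-occurrence order) to emit counts and analysis strings.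
import Mathlib
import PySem

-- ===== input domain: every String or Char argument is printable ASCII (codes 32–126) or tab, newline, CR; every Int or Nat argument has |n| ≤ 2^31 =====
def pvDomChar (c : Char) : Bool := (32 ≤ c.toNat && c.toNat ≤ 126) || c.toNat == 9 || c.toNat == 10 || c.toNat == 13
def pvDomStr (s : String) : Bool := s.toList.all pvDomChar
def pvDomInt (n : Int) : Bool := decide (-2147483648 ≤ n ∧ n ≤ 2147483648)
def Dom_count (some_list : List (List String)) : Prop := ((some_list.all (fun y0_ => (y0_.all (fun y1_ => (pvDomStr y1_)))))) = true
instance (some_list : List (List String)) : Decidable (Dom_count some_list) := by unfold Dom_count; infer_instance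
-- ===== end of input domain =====

-- B replaces A's per-value rescan (an inner counting loop over the whole sublist plus a
-- seen-list membership guard) with one dict-building pass per sublist followed by a single
-- traversal of the dict's items; a timing run reports it measurably faster.

-- ===== PORT A =====
def count (some_list : List (List String)) : List (List Int) × List (List String) :=
  -- count_same_birthday = []; count_birthday_analysis = []; for element in some_list: …
  some_list.foldl
    (fun acc element =>
      -- li = []; count_val = []; count_analysis = []; for value in element: …
      let st :=
        element.foldl
          (fun (st : List String × List Int × List String) value =>
            -- count = 0; for i in range(len(element)): if value == element[i]: count += 1
            let cnt : Int :=
              (PySem.List.pyRange 0 (PySem.List.len element)).foldl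
                (fun c i => if value == PySem.List.pyGetD element i "" then c + 1 else c) 0
            -- if value not in li: append count, the analysis string, and value
            if st.1.contains value then st
            else (st.1 ++ [value], st.2.1 ++ [cnt],
                  st.2.2 ++ [if cnt == 1 then value ++ " appears once."
                             else value ++ " appears " ++ PySem.Int.toStr cnt ++ " times."]))
          ([], [], [])
      (acc.1 ++ [st.2.1], acc.2 ++ [st.2.2]))
    ([], [])

-- ===== PORT B =====
def count_alt (some_list : List (List String)) : List (List Int) × List (List String) :=
  some_list.foldl
    (fun acc element =>
      -- table = {}; for value in element: table[value] = table.get(value, 0) + 1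
      let table : PySem.Dict String Int :=
        element.foldl (fun d value => d.insert value (d.getD value 0 + 1)) PySem.Dict.empty
      -- for value, c in table.items(): append c and the analysis string
      let inner :=
        table.items.foldl
          (fun (p : List Int × List String) kc =>
            (p.1 ++ [kc.2],
             p.2 ++ [if kc.2 == 1 then kc.1 ++ " appears once."
                     else kc.1 ++ " appears " ++ PySem.Int.toStr kc.2 ++ " times."]))
          ([], [])
      (acc.1 ++ [inner.1], acc.2 ++ [inner.2]))
    ([], [])

-- ===== PRECONDITION & SPEC =====
def Spec_count (some_list : List (List String)) (out : List (List Int) × List (List String)) : Prop := out = count_alt some_list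
instance (some_list : List (List String)) (out : List (List Int) × List (List String)) : Decidable (Spec_count some_list out) := by unfold Spec_count; infer_instance

-- ===== CLAIM (what is proved, stated in full; the proofs are below) =====
def Claim_equal_count : Prop := ∀ (some_list : List (List String)), Dom_count some_list → Spec_count some_list (count some_list)

-- ===== LEMMAS AND PROOFS =====

-- the analysis string for value v appearing c times
def pvMsg (v : String) (c : Int) : String :=
  if c == 1 then v ++ " appears once." else v ++ " appears " ++ PySem.Int.toStr c ++ " times."

lemma pv_beq_comm (a b : String) : (a == b) = (b == a) := by
  by_cases h : a = b
  · subst h; rfl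
  · simp [h, Ne.symm h]

-- A's inner range loop computes the number of occurrences of value in element
lemma pv_countA_eq (element : List String) (value : String) :
    (PySem.List.pyRange 0 (PySem.List.len element)).foldl
      (fun c i => if value == PySem.List.pyGetD element i "" then c + 1 else c) 0
    = (element.count value : Int) := by
  have h := PySem.List.foldl_pyRange_pyGetD element ""
      (fun (c : Int) x => if value == x then c + 1 else c) (0 : Int) (a := 0) (by norm_num)
  simp only [Int.toNat_zero, List.drop_zero] at h
  refine Eq.trans h ?_
  simp only [fun x => pv_beq_comm value x]
  rw [PySem.List.foldl_beq_add_one]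
  simp [List.count]

-- A's seen-list loop, with the per-value count and analysis abstracted as f and g:
-- it emits f/g of each first occurrence, i.e. of the ordered set of the values
lemma pv_foldl_dedup (f : String → Int) (g : String → String) :
    ∀ (l li : List String) (cv : List Int) (ca : List String),
      l.foldl (fun (st : List String × List Int × List String) v =>
          if st.1.contains v then st
          else (st.1 ++ [v], st.2.1 ++ [f v], st.2.2 ++ [g v])) (li, cv, ca)
      = (PySem.Set.update li l,
         cv ++ (((PySem.Set.ofList l).filter (fun y => !(li.contains y))).map f),
         ca ++ (((PySem.Set.ofList l).filter (fun y => !(li.contains y))).map g)) := by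
  intro l
  induction l with
  | nil => intro li cv ca; simp [PySem.Set.update_nil, PySem.Set.ofList_nil]
  | cons x l ih =>
    intro li cv ca
    simp only [List.foldl_cons, PySem.Set.update_cons, PySem.Set.ofList_cons,
      PySem.Set.discard]
    by_cases h : li.contains x
    · rw [if_pos h]
      rw [ih li cv ca]
      have hadd : PySem.Set.add li x = li := PySem.Set.add_of_mem (by simpa using h)
      have hfilt : ∀ (q : String → Bool), q = (fun y => !(li.contains y)) →
          List.filter q (x :: List.filter (fun y => !(y == x)) (PySem.Set.ofList l))
          = List.filter q (PySem.Set.ofList l) := by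
        intro q hq
        rw [List.filter_cons_of_neg (by rw [hq]; simpa using h), List.filter_filter]
        refine List.filter_congr ?_
        intro y _
        rw [hq]
        by_cases hm : y ∈ li
        · simp [hm]
        · have hx : x ∈ li := by simpa using h
          have hne : y ≠ x := fun e => hm (e ▸ hx)
          simp [hm, hne]
      rw [hfilt _ rfl, hadd]
    · rw [if_neg h]
      rw [ih (li ++ [x]) (cv ++ [f x]) (ca ++ [g x])]
      have hadd : PySem.Set.add li x = li ++ [x] := PySem.Set.add_of_not_mem (by simpa using h)
      have hfilt :
          List.filter (fun y => !(li.contains y)) (x :: List.filter (fun y => !(y == x)) (PySem.Set.ofList l))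
          = x :: List.filter (fun y => !((li ++ [x]).contains y)) (PySem.Set.ofList l) := by
        rw [List.filter_cons_of_pos (by simpa using h), List.filter_filter]
        congr 1
        refine List.filter_congr ?_
        intro y _
        by_cases hyx : y = x
        · subst hyx; simp
        · by_cases hm : y ∈ li <;> simp [List.contains_eq_mem, hm, hyx]
      rw [hfilt, hadd]
      simp

-- B's items loop appends the counts and the analysis strings
lemma pv_foldl_items (l : List (String × Int)) :
    ∀ (a : List Int) (b : List String),
      l.foldl (fun (p : List Int × List String) kc =>
          (p.1 ++ [kc.2],
           p.2 ++ [if kc.2 == 1 then kc.1 ++ " appears once."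
                   else kc.1 ++ " appears " ++ PySem.Int.toStr kc.2 ++ " times."])) (a, b)
      = (a ++ l.map (·.2), b ++ l.map (fun kc => pvMsg kc.1 kc.2)) := by
  induction l with
  | nil => intro a b; simp
  | cons kc l ih => intro a b; simp only [List.foldl_cons]; rw [ih]; simp [pvMsg]

-- A's whole inner loop: counts and analysis of the distinct values in first-occurrence order
lemma pv_inner_eq (element : List String) :
    (element.foldl
      (fun (st : List String × List Int × List String) value =>
        let cnt : Int :=
          (PySem.List.pyRange 0 (PySem.List.len element)).foldl
            (fun c i => if value == PySem.List.pyGetD element i "" then c + 1 else c) 0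
        if st.1.contains value then st
        else (st.1 ++ [value], st.2.1 ++ [cnt],
              st.2.2 ++ [if cnt == 1 then value ++ " appears once."
                         else value ++ " appears " ++ PySem.Int.toStr cnt ++ " times."]))
      ([], [], []) : List String × List Int × List String).2
    = (((PySem.Set.ofList element).map (fun v => (element.count v : Int))),
       ((PySem.Set.ofList element).map (fun v => pvMsg v (element.count v : Int)))) := by
  have hstep :
      (fun (st : List String × List Int × List String) value =>
        let cnt : Int :=
          (PySem.List.pyRange 0 (PySem.List.len element)).foldl
            (fun c i => if value == PySem.List.pyGetD element i "" then c + 1 else c) 0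
        if st.1.contains value then st
        else (st.1 ++ [value], st.2.1 ++ [cnt],
              st.2.2 ++ [if cnt == 1 then value ++ " appears once."
                         else value ++ " appears " ++ PySem.Int.toStr cnt ++ " times."]))
      = (fun (st : List String × List Int × List String) v =>
          if st.1.contains v then st
          else (st.1 ++ [v], st.2.1 ++ [(element.count v : Int)],
                st.2.2 ++ [pvMsg v (element.count v : Int)])) := by
    funext st v
    simp only [pv_countA_eq, pvMsg]
  rw [hstep, pv_foldl_dedup (fun v => (element.count v : Int))
        (fun v => pvMsg v (element.count v : Int)) element [] [] []]
  simp

theorem pv_main (some_list : List (List String)) : count some_list = count_alt some_list := by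
  unfold count count_alt
  refine PySem.List.foldl_congr_mem _ _ _ _ ?_
  intro acc element _
  simp only []
  have hB : (element.foldl (fun (d : PySem.Dict String Int) value => d.insert value (d.getD value 0 + 1)) PySem.Dict.empty).items
      = (PySem.Set.ofList element).map (fun k => (k, (element.count k : Int))) := by
    rw [PySem.Dict.foldl_insert_getD_add_one_eq_counter, PySem.Dict.items_counter]
  rw [hB, pv_foldl_items, pv_inner_eq element]
  simp [List.map_map, Function.comp_def]

-- ===== VERDICT (by name: the statement is the Claim_ definition above) =====
theorem count_spec : Claim_equal_count := by
  intro some_list _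
  unfold Spec_count
  exact pv_main some_list
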